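-- pv_equiv track=rewrite | github.com/ericjiang97/CodingCompetitions | VCPC/Practice 2016/task4/KBW.py | findMaxStrength
-- ===== SOURCE A (Python) =====
-- def findMaxStrength(string):
--     stringArray = []
--     for i in range(len(string)):
--         stringArray.append(string[i])
--     currentStrength = StrengthCheck(stringArray)
--
--     i=0
--     while i<len(stringArray):
--         temparray = stringArray[:i]
--         if(stringArray[i]=='0'):
--             temparray.append('1')
--         else:
--             temparray.append('0')
--         temparray+=stringArray[i+1:len(stringArray)]
--         i+=1
--         if(StrengthCheck(temparray)>currentStrength):
--             currentStrength = StrengthCheck(temparray)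
--     return currentStrength
--
-- def StrengthCheck(array):
--     total = 0
--     current = array[0]
--     i = 0
--     counter = 0
--     cur = array[i]
--     for i in range(len(array)):
--         if array[i] == cur:
--             counter += 1
--         else:
--             cur = array[i]
--             total += counter ** 2
--             counter = 1
--     total += counter ** 2
--     return total
-- ===== SOURCE B (Python) =====
-- def findMaxStrength(string):
--     # Run-length encode once, then score every single-position flip in O(1)
--     # from local run deltas: O(n) total instead of A's O(n^2).
--     runs = []
--     cur = None
--     cnt = 0
--     for ch in string:
--         if ch == cur:
--             cnt += 1
--         else:
--             if cnt:
--                 runs.append((cur, cnt))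
--             cur = ch
--             cnt = 1
--     if cnt:
--         runs.append((cur, cnt))
--
--     base = 0
--     for _, l in runs:
--         base += l * l
--
--     best = base
--     for r in range(len(runs)):
--         c, L = runs[r]
--         target = '1' if c == '0' else '0'
--         prev_merge = r > 0 and runs[r - 1][0] == target
--         next_merge = r + 1 < len(runs) and runs[r + 1][0] == target
--         for j in range(L):
--             left = j
--             right = L - 1 - j
--             removed = L * L
--             mid = 1
--             if left == 0 and prev_merge:
--                 removed += runs[r - 1][1] ** 2
--                 mid += runs[r - 1][1]
--             if right == 0 and next_merge:
--                 removed += runs[r + 1][1] ** 2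
--                 mid += runs[r + 1][1]
--             cand = base - removed + left * left + right * right + mid * mid
--             if cand > best:
--                 best = cand
--     return best
-- ===== Notes on version B (the rewrite author's own statement) =====
-- stated objective: faster
-- what changed: Instead of rebuilding the flipped array and rescanning it for every position (A), B run-length encodes the string once and scores each single-character flip in O(1) from local run deltas (split the run, possibly merge with the neighbouring run when the flip sits at a run boundary and the neighbour carries the flipped character).
import Mathlib
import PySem

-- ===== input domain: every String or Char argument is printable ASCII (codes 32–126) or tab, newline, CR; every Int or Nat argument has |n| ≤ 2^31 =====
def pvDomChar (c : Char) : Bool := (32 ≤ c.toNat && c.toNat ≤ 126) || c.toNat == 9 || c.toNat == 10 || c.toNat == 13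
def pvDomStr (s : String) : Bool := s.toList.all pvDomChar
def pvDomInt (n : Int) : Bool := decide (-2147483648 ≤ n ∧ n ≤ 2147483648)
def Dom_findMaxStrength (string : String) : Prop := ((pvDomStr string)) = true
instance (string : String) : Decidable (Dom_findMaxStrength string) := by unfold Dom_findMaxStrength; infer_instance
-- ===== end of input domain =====

-- B replaces A's rebuild-and-rescan of every single-character flip (O(n^2)) by one
-- run-length encoding pass plus an O(1) local-delta score per flip (O(n) total).

-- ===== PORT A =====
-- StrengthCheck: sum of squares of run lengths, by a left scan.  'array[0]' raises
-- IndexError on []; that input is excluded by Pre_, the [] branch here is unreachable there.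
def strengthCheckA (xs : List Char) : Int :=
  match xs with
  | [] => 0
  | c :: _ =>
    let fin := xs.foldl (fun (st : Char × Int × Int) a =>
        if a == st.1 then (st.1, st.2.1, st.2.2 + 1)
        else (a, st.2.1 + st.2.2 ^ 2, 1)) (c, 0, 0)
    fin.2.1 + fin.2.2 ^ 2

def findMaxStrength (string : String) : Int :=
  let sa := string.toList          -- the element-by-element copy loop builds exactly the char list
  let current := strengthCheckA sa
  -- while i < len: temparray = sa[:i] ++ [flip sa[i]] ++ sa[i+1:len]; slices with
  -- 0 ≤ i < len are exactly take/drop, and sa.getD i ' ' = sa[i] since i < len.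
  (List.range sa.length).foldl (fun cur i =>
    let temp := sa.take i ++ [if sa.getD i ' ' == '0' then '1' else '0'] ++ sa.drop (i + 1)
    if strengthCheckA temp > cur then strengthCheckA temp else cur) current

-- ===== PORT B =====
-- run-length encoding scan of Source B: state (cur, cnt, runs); cur is None (none) only
-- while cnt = 0, so the '.getD' default is never the emitted char.
def buildRunsB (xs : List Char) : List (Char × Int) :=
  let st := xs.foldl (fun (st : Option Char × Int × List (Char × Int)) ch =>
      if some ch == st.1 then (st.1, st.2.1 + 1, st.2.2)
      else (some ch, 1, if st.2.1 ≠ 0 then st.2.2 ++ [(st.1.getD ' ', st.2.1)] else st.2.2))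
    (none, 0, [])
  if st.2.1 ≠ 0 then st.2.2 ++ [(st.1.getD ' ', st.2.1)] else st.2.2

def findMaxStrength_alt (string : String) : Int :=
  let runs := buildRunsB string.toList
  let base := runs.foldl (fun acc p => acc + p.2 * p.2) 0
  (List.range runs.length).foldl (fun best r =>
    let c := (runs.getD r (' ', 0)).1
    let L := (runs.getD r (' ', 0)).2
    let target := if c == '0' then '1' else '0'
    let prevMerge := decide (r > 0) && ((runs.getD (r - 1) (' ', 0)).1 == target)
    let nextMerge := decide (r + 1 < runs.length) && ((runs.getD (r + 1) (' ', 0)).1 == target)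
    (PySem.List.pyRange 0 L 1).foldl (fun best j =>
      let left := j
      let right := L - 1 - j
      let removed1 := L * L
      let mid1 : Int := 1
      let removed2 := if left == 0 && prevMerge then removed1 + (runs.getD (r - 1) (' ', 0)).2 ^ 2 else removed1
      let mid2 := if left == 0 && prevMerge then mid1 + (runs.getD (r - 1) (' ', 0)).2 else mid1
      let removed3 := if right == 0 && nextMerge then removed2 + (runs.getD (r + 1) (' ', 0)).2 ^ 2 else removed2
      let mid3 := if right == 0 && nextMerge then mid2 + (runs.getD (r + 1) (' ', 0)).2 else mid2
      let cand := base - removed3 + left * left + right * right + mid3 * mid3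
      if cand > best then cand else best) best) base

-- ===== PRECONDITION & SPEC =====
-- Pre_ excludes only the empty string, on which A's StrengthCheck raises IndexError (array[0]).
def Pre_findMaxStrength (string : String) : Prop := string ≠ ""
instance (string : String) : Decidable (Pre_findMaxStrength string) := by unfold Pre_findMaxStrength; infer_instance
def pvWitness_findMaxStrength : String := "0110"

def Spec_findMaxStrength (string : String) (out : Int) : Prop := out = findMaxStrength_alt string
instance (string : String) (out : Int) : Decidable (Spec_findMaxStrength string out) := by unfold Spec_findMaxStrength; infer_instance

-- ===== CLAIM (what is proved, stated in full; the proofs are below) =====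
def Claim_equal_findMaxStrength : Prop := ∀ (string : String), Dom_findMaxStrength string → Pre_findMaxStrength string → Spec_findMaxStrength string (findMaxStrength string)

-- ===== LEMMAS AND PROOFS =====

def runsFrom (cur : Char) (cnt : Nat) : List Char → List (Char × Nat)
  | [] => [(cur, cnt)]
  | a :: xs => if a = cur then runsFrom cur (cnt + 1) xs else (cur, cnt) :: runsFrom a 1 xs

def runsL : List Char → List (Char × Nat)
  | [] => []
  | c :: xs => runsFrom c 1 xs

def FL (rs : List (Char × Nat)) : List Char := rs.flatMap (fun p => List.replicate p.2 p.1)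

def sqR (rs : List (Char × Nat)) : Int := (rs.map (fun p => ((p.2 : Int)) ^ 2)).sum

def CanonR (rs : List (Char × Nat)) : Prop :=
  (∀ p ∈ rs, 1 ≤ p.2) ∧ rs.IsChain (fun p q => p.1 ≠ q.1)

theorem runsFrom_shape (xs : List Char) (cur : Char) :
    ∃ k t, ∀ n, runsFrom cur n xs = (cur, n + k) :: t := by
  induction xs generalizing cur with
  | nil => exact ⟨0, [], fun n => rfl⟩
  | cons a xs ih =>
    by_cases h : a = cur
    · subst h
      obtain ⟨k, t, hk⟩ := ih a
      exact ⟨k + 1, t, fun n => by simp [runsFrom, hk (n + 1), Nat.add_assoc, Nat.add_comm 1 k]⟩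
    · exact ⟨0, runsFrom a 1 xs, fun n => by simp [runsFrom, h]⟩

theorem runsFrom_rep (ys : List Char) (c : Char) (n : Nat) :
    ∀ k, runsFrom c n (List.replicate k c ++ ys) = runsFrom c (n + k) ys := by
  intro k
  induction k generalizing n with
  | zero => simp
  | succ k ih =>
    simp [List.replicate_succ, runsFrom, ih (n + 1), Nat.add_assoc, Nat.add_comm 1 k]

def glueR : List (Char × Nat) → List (Char × Nat) → List (Char × Nat)
  | us, [] => us
  | us, (d, k) :: zs =>
    match us.getLast? with
    | some (p, P) => if p = d then us.dropLast ++ (p, P + k) :: zs else us ++ (d, k) :: zs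
    | none => (d, k) :: zs

def runsL' : List Char → List (Char × Nat)
  | [] => []
  | d :: z => runsFrom d 1 z

theorem runsFrom_glue (v : List (Char × Nat)) (cur : Char) (n : Nat) (Z : List Char)
    (hc : ∀ p ∈ v, 1 ≤ p.2) (hch : ((cur, n) :: v).IsChain (fun p q => p.1 ≠ q.1)) :
    runsFrom cur n (FL v ++ Z) = glueR ((cur, n) :: v) (runsL' Z) := by
  induction v generalizing cur n with
  | nil =>
    cases Z with
    | nil => simp [FL, runsL', glueR, runsFrom]
    | cons d z =>
      by_cases h : d = cur
      · subst h
        obtain ⟨k, t, hk⟩ := runsFrom_shape z d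
        simp [FL, runsL', runsFrom, glueR, hk 1, hk (n + 1), Nat.add_assoc, Nat.add_comm 1 k]
      · obtain ⟨k, t, hk⟩ := runsFrom_shape z d
        simp [FL, runsL', runsFrom, h, glueR, hk 1, Ne.symm h]
  | cons em v ih =>
    obtain ⟨e, m⟩ := em
    have hm : 1 ≤ m := hc (e, m) (by simp)
    have hne : e ≠ cur := by
      rcases List.isChain_cons.1 hch with ⟨h1, -⟩
      exact fun h => (h1 (e, m) (by simp)) h.symm |>.elim  -- may need fixing
    have step : runsFrom cur n (FL ((e, m) :: v) ++ Z)
        = (cur, n) :: runsFrom e m (FL v ++ Z) := by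
      have hrep : List.replicate m e = e :: List.replicate (m - 1) e := by
        cases m with
        | zero => omega
        | succ m => simp [List.replicate_succ]
      rw [FL, List.flatMap_cons, hrep]
      simp only [List.cons_append, List.append_assoc, runsFrom, if_neg hne]
      rw [runsFrom_rep]
      congr 2
      omega
    rw [step, ih e m (fun p hp => hc p (by simp [hp])) (List.isChain_cons.1 hch).2]
    -- now: (cur,n) :: glueR ((e,m)::v) (runsL' Z) = glueR ((cur,n)::(e,m)::v) (runsL' Z)
    cases hZ : runsL' Z with
    | nil => simp [glueR]
    | cons dk zs =>
      obtain ⟨d, k⟩ := dk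
      show (cur, n) :: glueR ((e, m) :: v) ((d, k) :: zs) = glueR ((cur, n) :: (e, m) :: v) ((d, k) :: zs)
      simp only [glueR]
      cases hl : ((e, m) :: v).getLast? with
      | none => simp at hl
      | some pP =>
        obtain ⟨p, P⟩ := pP
        have hl2 : ((cur, n) :: (e, m) :: v).getLast? = some (p, P) := by
          rw [List.getLast?_cons_cons]; exact hl
        rw [hl2]
        by_cases hpd : p = d
        · simp only [hpd, if_true]
          rw [show ((cur, n) :: (e, m) :: v).dropLast = (cur, n) :: ((e, m) :: v).dropLast from
            List.dropLast_cons_of_ne_nil (by simp)]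
          simp
        · simp [hpd]

theorem runsL_glue (W : List (Char × Nat)) (Z : List Char)
    (hc : ∀ p ∈ W, 1 ≤ p.2) (hch : W.IsChain (fun p q => p.1 ≠ q.1)) (hW : W ≠ []) :
    runsL (FL W ++ Z) = glueR W (runsL' Z) := by
  cases W with
  | nil => exact absurd rfl hW
  | cons cn v =>
    obtain ⟨c, n⟩ := cn
    have hn : 1 ≤ n := hc (c, n) (by simp)
    have hrep : List.replicate n c = c :: List.replicate (n - 1) c := by
      cases n with
      | zero => omega
      | succ m => simp [List.replicate_succ]
    rw [FL, List.flatMap_cons, hrep]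
    simp only [List.cons_append, List.append_assoc]
    rw [runsL, runsFrom_rep, show 1 + (n-1) = n by omega]
    exact runsFrom_glue v c n Z (fun p hp => hc p (by simp [hp])) hch

theorem glueR_nil (W : List (Char × Nat)) : glueR W [] = W := by cases W <;> rfl

theorem runsFrom_props (xs : List Char) (cur : Char) (n : Nat) (hn : 1 ≤ n) :
    (∀ p ∈ runsFrom cur n xs, 1 ≤ p.2) ∧ (runsFrom cur n xs).IsChain (fun p q => p.1 ≠ q.1)
      ∧ FL (runsFrom cur n xs) = List.replicate n cur ++ xs := by
  induction xs generalizing cur n with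
  | nil => refine ⟨by simpa [runsFrom] using hn, by simp [runsFrom], by simp [runsFrom, FL]⟩
  | cons a xs ih =>
    by_cases h : a = cur
    · subst h
      have := ih a (n + 1) (by omega)
      refine ⟨by simpa [runsFrom] using this.1, by simpa [runsFrom] using this.2.1, ?_⟩
      simp [runsFrom, this.2.2, List.replicate_succ', List.append_assoc]
    · have := ih a 1 le_rfl
      obtain ⟨k, t, hk⟩ := runsFrom_shape xs a
      refine ⟨?_, ?_, ?_⟩
      · intro p hp
        simp only [runsFrom, if_neg h, List.mem_cons] at hp
        rcases hp with rfl | hp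
        · exact hn
        · exact this.1 p hp
      · simp only [runsFrom, if_neg h]
        rw [List.isChain_cons]
        refine ⟨?_, this.2.1⟩
        intro y hy
        rw [hk 1] at hy
        simp only [List.head?_cons, Option.mem_def, Option.some.injEq] at hy
        rw [← hy]
        exact fun heq => h heq.symm
      · simp only [runsFrom, if_neg h, FL, List.flatMap_cons]
        have h2 := this.2.2
        rw [FL] at h2
        simp [h2]

theorem runsL_canon (xs : List Char) (hxs : xs ≠ []) :
    (∀ p ∈ runsL xs, 1 ≤ p.2) ∧ (runsL xs).IsChain (fun p q => p.1 ≠ q.1)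
      ∧ FL (runsL xs) = xs ∧ runsL xs ≠ [] := by
  cases xs with
  | nil => exact absurd rfl hxs
  | cons c t =>
    have := runsFrom_props t c 1 le_rfl
    obtain ⟨k, tt, hk⟩ := runsFrom_shape t c
    refine ⟨this.1, this.2.1, by simpa [runsL] using this.2.2, by rw [runsL, hk 1]; simp⟩

def stepA (st : Char × Int × Int) (a : Char) : Char × Int × Int :=
  if a == st.1 then (st.1, st.2.1, st.2.2 + 1) else (a, st.2.1 + st.2.2 ^ 2, 1)

theorem sqR_cons (c : Char) (n : Nat) (t : List (Char × Nat)) :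
    sqR ((c, n) :: t) = (n : Int) ^ 2 + sqR t := by simp [sqR]

-- A's StrengthCheck fold computes the sum of squares of the run lengths
theorem foldA_inv (xs : List Char) :
    ∀ (cur : Char) (total : Int) (cnt : Nat),
    (xs.foldl stepA (cur, total, (cnt : Int))).2.1
      + (xs.foldl stepA (cur, total, (cnt : Int))).2.2 ^ 2
      = total + sqR (runsFrom cur cnt xs) := by
  induction xs with
  | nil => intro cur total cnt; simp [runsFrom, sqR]
  | cons a xs ih =>
    intro cur total cnt
    rw [List.foldl_cons]
    by_cases h : a = cur
    · subst h
      rw [show stepA (a, total, (cnt : Int)) a = (a, total, ((cnt + 1 : Nat) : Int)) by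
        simp [stepA]]
      rw [ih a total (cnt + 1), runsFrom, if_pos rfl]
    · rw [show stepA (cur, total, (cnt : Int)) a
          = (a, total + (cnt : Int) ^ 2, ((1 : Nat) : Int)) by simp [stepA, h]]
      rw [ih a (total + (cnt : Int) ^ 2) 1, runsFrom, if_neg h, sqR_cons]
      ring



theorem strengthA_eq (c : Char) (t : List Char) :
    strengthCheckA (c :: t) = sqR (runsFrom c 1 t) := by
  show (let fin := (c :: t).foldl stepA (c, 0, 0); fin.2.1 + fin.2.2 ^ 2) = _
  rw [List.foldl_cons]
  rw [show stepA (c, (0:Int), (0:Int)) c = (c, 0, ((1 : Nat) : Int)) by simp [stepA]]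
  simpa using foldA_inv t c 0 1

theorem strengthA_runsL (X : List Char) (hX : X ≠ []) :
    strengthCheckA X = sqR (runsL X) := by
  cases X with
  | nil => exact absurd rfl hX
  | cons c t => exact strengthA_eq c t

theorem sqR_append (l1 l2 : List (Char × Nat)) : sqR (l1 ++ l2) = sqR l1 + sqR l2 := by
  simp [sqR]

theorem sqR_dropLast (W : List (Char × Nat)) (p : Char) (P : Nat)
    (h : W.getLast? = some (p, P)) : sqR W = sqR W.dropLast + (P : Int) ^ 2 := by
  have hW : W ≠ [] := by rintro rfl; simp at h
  have h2 : W.getLast hW = (p, P) := by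
    have := List.getLast?_eq_some_getLast (l := W) hW
    rw [h] at this
    exact Option.some_injective _ this.symm
  conv_lhs => rw [← List.dropLast_concat_getLast (l := W) hW]
  rw [sqR_append, h2]
  simp [sqR]

theorem glueR_last_ne (W : List (Char × Nat)) (p : Char) (P : Nat) (d : Char) (k : Nat)
    (zs : List (Char × Nat)) (h : W.getLast? = some (p, P)) (hne : p ≠ d) :
    glueR W ((d, k) :: zs) = W ++ (d, k) :: zs := by
  rw [glueR, h]
  simp [hne]

theorem glueR_last_eq (W : List (Char × Nat)) (p : Char) (P k : Nat)
    (zs : List (Char × Nat)) (h : W.getLast? = some (p, P)) :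
    glueR W ((p, k) :: zs) = W.dropLast ++ (p, P + k) :: zs := by
  rw [glueR, h]
  simp

theorem runsFrom_FL (v : List (Char × Nat)) (cur : Char) (n : Nat)
    (hc : ∀ p ∈ v, 1 ≤ p.2) (hch : ((cur, n) :: v).IsChain (fun p q => p.1 ≠ q.1)) :
    runsFrom cur n (FL v) = (cur, n) :: v := by
  have := runsFrom_glue v cur n [] hc hch
  simpa [runsL', glueR_nil] using this

def flipc (c : Char) : Char := if c == '0' then '1' else '0'

theorem flipc_ne (c : Char) : flipc c ≠ c := by
  by_cases h : c = '0'
  · subst h; decide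
  · simp [flipc, h]
    exact fun he => h he.symm

def candA (sa : List Char) (i : Nat) : Int :=
  strengthCheckA (sa.take i ++ [if sa.getD i ' ' == '0' then '1' else '0'] ++ sa.drop (i + 1))

def pchar : Option (Char × Nat) → Char → Bool
  | some p, t => p.1 == t
  | none, _ => false

def pcnt : Option (Char × Nat) → Int
  | some p => (p.2 : Int)
  | none => 0

def candB (S : Int) (prev : Option (Char × Nat)) (c : Char) (L : Nat)
    (next : Option (Char × Nat)) (j : Nat) : Int :=
  let pm : Bool := decide (j = 0) && pchar prev (flipc c)
  let nm : Bool := decide (j = L - 1) && pchar next (flipc c)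
  let removed : Int := (L : Int) ^ 2 + (if pm then (pcnt prev) ^ 2 else 0)
      + (if nm then (pcnt next) ^ 2 else 0)
  let mid : Int := 1 + (if pm then pcnt prev else 0) + (if nm then pcnt next else 0)
  S - removed + (j : Int) ^ 2 + ((L - 1 - j : Nat) : Int) ^ 2 + mid ^ 2

theorem candA_shape (Pre Suf : List Char) (c : Char) (L j : Nat) (hj : j < L) :
    candA (Pre ++ (List.replicate L c ++ Suf)) (Pre.length + j)
      = strengthCheckA (Pre ++ (List.replicate j c
          ++ flipc c :: (List.replicate (L - 1 - j) c ++ Suf))) := by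
  have htake : (Pre ++ (List.replicate L c ++ Suf)).take (Pre.length + j)
      = Pre ++ List.replicate j c := by
    rw [List.take_append]
    congr 1
    · simp
    · rw [Nat.add_sub_cancel_left, List.take_append, List.take_replicate,
        Nat.min_eq_left (by omega), show j - (List.replicate L c).length = 0 by simp; omega]
      simp
  have hget : (Pre ++ (List.replicate L c ++ Suf)).getD (Pre.length + j) ' ' = c := by
    rw [List.getD_append_right _ _ _ _ (by omega), Nat.add_sub_cancel_left,
      List.getD_append _ _ _ _ (by simpa using hj), List.getD_replicate _ hj]
  have hdrop : (Pre ++ (List.replicate L c ++ Suf)).drop (Pre.length + j + 1)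
      = List.replicate (L - 1 - j) c ++ Suf := by
    rw [List.drop_append, List.drop_of_length_le (by omega), Nat.add_assoc,
      Nat.add_sub_cancel_left, List.drop_append, List.drop_replicate,
      show j + 1 - (List.replicate L c).length = 0 by simp; omega]
    simp [show L - (j + 1) = L - 1 - j by omega]
  rw [candA, htake, hget, hdrop]
  show strengthCheckA (_ ++ [flipc c] ++ _) = _
  simp [List.append_assoc]

-- RIGHT package: the runs of the suffix starting at the flipped character
theorem right_pack (c : Char) (L j : Nat) (v : List (Char × Nat)) (hj : j < L)
    (hcv : ∀ p ∈ v, 1 ≤ p.2) (hvh : ∀ y ∈ v.head?, c ≠ y.1)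
    (hchv : v.IsChain (fun p q => p.1 ≠ q.1)) :
    ∃ (mq : Nat) (Mtail : List (Char × Nat)),
      runsFrom (flipc c) 1 (List.replicate (L - 1 - j) c ++ FL v)
          = (flipc c, 1 + mq) :: Mtail
      ∧ ((mq : Int) = if (decide (j = L - 1) && pchar v.head? (flipc c)) then pcnt v.head? else 0)
      ∧ sqR Mtail = sqR v + ((L - 1 - j : Nat) : Int) ^ 2
          - (if (decide (j = L - 1) && pchar v.head? (flipc c)) then (pcnt v.head?) ^ 2 else 0) := by
  have ht := flipc_ne c
  by_cases hjl : j = L - 1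
  · subst hjl
    simp only [show L - 1 - (L - 1) = 0 from by omega, List.replicate_zero, List.nil_append]
    cases v with
    | nil =>
      refine ⟨0, [], ?_, by simp [pchar, pcnt], by simp [sqR, pchar]⟩
      simp [FL, runsFrom]
    | cons qQ v' =>
      obtain ⟨q, Q⟩ := qQ
      by_cases hqt : q = flipc c
      · subst hqt
        have hQ : 1 ≤ Q := hcv (flipc c, Q) (by simp)
        have hrep : FL ((flipc c, Q) :: v') = List.replicate Q (flipc c) ++ FL v' := by simp [FL]
        rw [hrep, runsFrom_rep]
        have := runsFrom_FL v' (flipc c) (1 + Q) (fun p hp => hcv p (by simp [hp]))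
          (by
            rw [List.isChain_cons]
            refine ⟨?_, (List.isChain_cons.1 hchv).2⟩
            intro y hy
            exact (List.isChain_cons.1 hchv).1 y hy)
        rw [this]
        refine ⟨Q, v', rfl, by simp [pchar, pcnt], ?_⟩
        simp [sqR, pcnt, pchar]
      · have := runsFrom_FL ((q, Q) :: v') (flipc c) 1 hcv
          (by
            rw [List.isChain_cons]
            exact ⟨by intro y hy; simp at hy; rw [← hy]; exact fun h => hqt h.symm, hchv⟩)
        refine ⟨0, (q, Q) :: v', by simpa using this, by simp [pchar, hqt], ?_⟩
        simp [pchar, hqt, show L - 1 - (L - 1) = 0 from by omega]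
  · have hjl2 : 1 ≤ L - 1 - j := by omega
    have := runsFrom_FL ((c, L - 1 - j) :: v) (flipc c) 1
      (by
        intro p hp
        rcases List.mem_cons.1 hp with rfl | hp2
        · exact hjl2
        · exact hcv p hp2)
      (by
        rw [List.isChain_cons, List.isChain_cons]
        refine ⟨?_, ?_, hchv⟩
        · intro y hy; simp at hy; rw [← hy]; exact ht
        · exact hvh)
    rw [show FL ((c, L - 1 - j) :: v) = List.replicate (L - 1 - j) c ++ FL v from by simp [FL]] at this
    refine ⟨0, (c, L - 1 - j) :: v, by simpa using this, by simp [hjl], ?_⟩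
    simp [hjl, sqR_cons]
    ring

-- LEFT package: prepending the prefix runs and the left part of the split run
theorem left_pack (u : List (Char × Nat)) (c : Char) (j mq : Nat)
    (Mtail : List (Char × Nat)) (R : List Char)
    (hM : runsFrom (flipc c) 1 R = (flipc c, 1 + mq) :: Mtail)
    (hcu : ∀ p ∈ u, 1 ≤ p.2) (hchu : u.IsChain (fun p q => p.1 ≠ q.1))
    (hpc : ∀ x ∈ u.getLast?, x.1 ≠ c) :
    ∃ (pq : Nat) (U' : List (Char × Nat)),
      runsL (FL u ++ (List.replicate j c ++ flipc c :: R))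
          = U' ++ (flipc c, 1 + mq + pq) :: Mtail
      ∧ ((pq : Int) = if (decide (j = 0) && pchar u.getLast? (flipc c)) then pcnt u.getLast? else 0)
      ∧ sqR U' = sqR u + (j : Int) ^ 2
          - (if (decide (j = 0) && pchar u.getLast? (flipc c)) then (pcnt u.getLast?) ^ 2 else 0) := by
  have ht := flipc_ne c
  by_cases hj0 : j = 0
  · subst hj0
    simp only [List.replicate_zero, List.nil_append]
    cases hu : u with
    | nil =>
      refine ⟨0, [], ?_, by simp [pchar, pcnt], by simp [sqR, pchar]⟩
      simp [FL, runsL, hM, hu]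
    | cons u0 urest =>
      rw [← hu]
      have hune : u ≠ [] := by rw [hu]; simp
      cases hgl : u.getLast? with
      | none => exact absurd (List.getLast?_eq_none_iff.1 hgl) hune
      | some pP =>
        obtain ⟨p, P⟩ := pP
        have hglue : runsL (FL u ++ flipc c :: R) = glueR u (runsL' (flipc c :: R)) :=
          runsL_glue u (flipc c :: R) hcu hchu hune
        rw [show runsL' (flipc c :: R) = (flipc c, 1 + mq) :: Mtail from hM] at hglue
        by_cases hpt : p = flipc c
        · subst hpt
          rw [glueR_last_eq u _ P _ _ hgl] at hglue
          refine ⟨P, u.dropLast, ?_, by simp [hgl, pchar, pcnt], ?_⟩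
          · rw [hglue]
            congr 3
            omega
          · have := sqR_dropLast u _ P hgl
            simp [hgl, pchar, pcnt]
            omega
        · rw [glueR_last_ne u p P _ _ _ hgl (fun h => hpt h)] at hglue
          refine ⟨0, u, by simpa using hglue, by simp [hgl, pchar, hpt], ?_⟩
          simp [hgl, pchar, hpt]
  · have hj1 : 1 ≤ j := by omega
    have hWc : ∀ p ∈ u ++ [(c, j)], 1 ≤ p.2 := by
      intro p hp
      rcases List.mem_append.1 hp with h | h
      · exact hcu p h
      · simp at h; rw [h]; exact hj1
    have hWch : (u ++ [(c, j)]).IsChain (fun p q => p.1 ≠ q.1) := by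
      rw [List.isChain_append]
      refine ⟨hchu, by simp, ?_⟩
      intro x hx y hy
      simp only [List.head?_cons, Option.mem_def, Option.some.injEq] at hy
      rw [← hy]
      exact hpc x hx
    have hglue : runsL (FL (u ++ [(c, j)]) ++ flipc c :: R)
        = glueR (u ++ [(c, j)]) (runsL' (flipc c :: R)) :=
      runsL_glue _ _ hWc hWch (by simp)
    rw [show runsL' (flipc c :: R) = (flipc c, 1 + mq) :: Mtail from hM] at hglue
    rw [glueR_last_ne _ c j _ _ _ List.getLast?_concat (fun h => ht h.symm)] at hglue
    refine ⟨0, u ++ [(c, j)], ?_, by simp [hj0], ?_⟩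
    · rw [show (1 + mq + 0) = 1 + mq from by omega, ← hglue]
      congr 1
      simp [FL]
    · rw [sqR_append]
      simp [hj0, sqR]

-- CORE: the strength after flipping position (|FL u| + j) equals B's local-delta formula
theorem core_eq (u : List (Char × Nat)) (c : Char) (L : Nat) (v : List (Char × Nat)) (j : Nat)
    (hcanon : CanonR (u ++ (c, L) :: v)) (hj : j < L) :
    candA (FL (u ++ (c, L) :: v)) ((FL u).length + j)
      = candB (sqR (u ++ (c, L) :: v)) u.getLast? c L v.head? j := by
  obtain ⟨hcnt, hch⟩ := hcanon
  have hcu : ∀ p ∈ u, 1 ≤ p.2 := fun p hp => hcnt p (by simp [hp])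
  have hcv : ∀ p ∈ v, 1 ≤ p.2 := fun p hp => hcnt p (by simp [hp])
  rw [List.isChain_append] at hch
  obtain ⟨hchu, hchcv, hjunc⟩ := hch
  have hpc : ∀ x ∈ u.getLast?, x.1 ≠ c := fun x hx => hjunc x hx (c, L) (by simp)
  have hvh : ∀ y ∈ v.head?, c ≠ y.1 := by
    intro y hy
    exact (List.isChain_cons.1 hchcv).1 y hy
  have hchv : v.IsChain (fun p q => p.1 ≠ q.1) := (List.isChain_cons.1 hchcv).2
  have hFLl : FL (u ++ (c, L) :: v) = FL u ++ (List.replicate L c ++ FL v) := by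
    simp [FL]
  rw [hFLl, candA_shape (FL u) (FL v) c L j hj]
  obtain ⟨mq, Mtail, hM, hmq, hsqM⟩ := right_pack c L j v hj hcv hvh hchv
  obtain ⟨pq, U', hU, hpq, hsqU⟩ := left_pack u c j mq Mtail _ hM hcu hchu hpc
  rw [strengthA_runsL _ (by simp), hU, sqR_append, sqR_cons]
  have hS : sqR (u ++ (c, L) :: v) = sqR u + (L : Int) ^ 2 + sqR v := by
    rw [sqR_append, sqR_cons]; ring
  have hpq2 : ((pq : Int)) ^ 2
      = (if (decide (j = 0) && pchar u.getLast? (flipc c)) then (pcnt u.getLast?) ^ 2 else 0) := by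
    rw [hpq]; split_ifs <;> simp
  have hmq2 : ((mq : Int)) ^ 2
      = (if (decide (j = L - 1) && pchar v.head? (flipc c)) then (pcnt v.head?) ^ 2 else 0) := by
    rw [hmq]; split_ifs <;> simp
  rw [hsqU, hsqM, candB, hS]
  push_cast
  rw [← hpq, ← hmq, ← hpq2, ← hmq2]
  ring

def candListB (S : Int) : Option (Char × Nat) → List (Char × Nat) → List Int
  | _, [] => []
  | prev, (c, L) :: v => (List.range L).map (candB S prev c L v.head?) ++ candListB S (some (c, L)) v

theorem pos_eq (v : List (Char × Nat)) :
    ∀ (u : List (Char × Nat)), CanonR (u ++ v) →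
    (List.range (FL v).length).map (fun k => candA (FL (u ++ v)) ((FL u).length + k))
      = candListB (sqR (u ++ v)) u.getLast? v := by
  induction v with
  | nil => intro u _; simp [FL, candListB]
  | cons cL v' ih =>
    intro u hcanon
    obtain ⟨c, L⟩ := cL
    have hlen : (FL ((c, L) :: v')).length = L + (FL v').length := by simp [FL]
    rw [hlen, List.range_add, List.map_append, candListB]
    congr 1
    · apply List.map_congr_left
      intro k hk
      exact core_eq u c L v' k hcanon (List.mem_range.1 hk)
    · rw [List.map_map]
      have hassoc : (u ++ [(c, L)]) ++ v' = u ++ (c, L) :: v' := by simp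
      have := ih (u ++ [(c, L)]) (by rw [hassoc]; exact hcanon)
      rw [hassoc] at this
      rw [show (FL (u ++ [(c, L)])).length = (FL u).length + L from by simp [FL], ] at this
      rw [List.getLast?_concat] at this
      rw [← this]
      apply List.map_congr_left
      intro k _
      show candA (FL (u ++ (c, L) :: v')) ((FL u).length + (L + k)) = _
      congr 1
      omega

def opMax (b x : Int) : Int := if x > b then x else b

theorem foldl_opMax_flatMap {α : Type} (l : List α) (g : α → List Int) :
    ∀ (b : Int), l.foldl (fun acc r => (g r).foldl opMax acc) b = (l.flatMap g).foldl opMax b := by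
  induction l with
  | nil => intro b; simp
  | cons a l ih => intro b; rw [List.flatMap_cons, List.foldl_append, List.foldl_cons, ih]

-- A's whole loop, at the list level
theorem A_list (xs : List Char) (hxs : xs ≠ []) :
    (List.range xs.length).foldl (fun cur i =>
        if strengthCheckA (xs.take i ++ [if xs.getD i ' ' == '0' then '1' else '0'] ++ xs.drop (i + 1)) > cur
        then strengthCheckA (xs.take i ++ [if xs.getD i ' ' == '0' then '1' else '0'] ++ xs.drop (i + 1))
        else cur) (strengthCheckA xs)
      = List.foldl opMax (sqR (runsL xs)) (candListB (sqR (runsL xs)) none (runsL xs)) := by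
  obtain ⟨hc, hch, hF, hne⟩ := runsL_canon xs hxs
  have h1 : (List.range xs.length).foldl (fun cur i =>
        if strengthCheckA (xs.take i ++ [if xs.getD i ' ' == '0' then '1' else '0'] ++ xs.drop (i + 1)) > cur
        then strengthCheckA (xs.take i ++ [if xs.getD i ' ' == '0' then '1' else '0'] ++ xs.drop (i + 1))
        else cur) (strengthCheckA xs)
      = ((List.range xs.length).map (candA xs)).foldl opMax (strengthCheckA xs) := by
    rw [List.foldl_map]
    rfl
  rw [h1, strengthA_runsL xs hxs]
  congr 1
  have := pos_eq (runsL xs) [] ⟨hc, hch⟩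
  simp only [List.nil_append, FL, List.flatMap_nil, List.length_nil, List.getLast?_nil] at this
  rw [← FL] at this
  rw [hF] at this
  rw [← this]
  apply List.map_congr_left
  intro k _
  simp

def intify (rs : List (Char × Nat)) : List (Char × Int) := rs.map (fun p => (p.1, (p.2 : Int)))

def stepB (st : Option Char × Int × List (Char × Int)) (ch : Char) : Option Char × Int × List (Char × Int) :=
  if some ch == st.1 then (st.1, st.2.1 + 1, st.2.2)
  else (some ch, 1, if st.2.1 ≠ 0 then st.2.2 ++ [(st.1.getD ' ', st.2.1)] else st.2.2)

theorem foldB_inv (xs : List Char) :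
    ∀ (cur : Char) (n : Nat) (acc : List (Char × Int)), 1 ≤ n →
    (let st := xs.foldl stepB (some cur, (n : Int), acc)
     if st.2.1 ≠ 0 then st.2.2 ++ [(st.1.getD ' ', st.2.1)] else st.2.2)
      = acc ++ intify (runsFrom cur n xs) := by
  induction xs with
  | nil =>
    intro cur n acc hn
    simp only [List.foldl_nil]
    rw [if_pos (by simp; omega)]
    simp [intify, runsFrom]
  | cons a xs ih =>
    intro cur n acc hn
    rw [List.foldl_cons]
    by_cases h : a = cur
    · subst h
      rw [show stepB (some a, (n : Int), acc) a = (some a, ((n + 1 : Nat) : Int), acc) by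
        simp [stepB]]
      rw [ih a (n + 1) acc (by omega), runsFrom, if_pos rfl]
    · rw [show stepB (some cur, (n : Int), acc) a
          = (some a, ((1 : Nat) : Int), acc ++ [(cur, (n : Int))]) by
        simp [stepB, h, Option.getD]
        omega]
      rw [ih a 1 _ le_rfl, runsFrom, if_neg h]
      simp [intify]

theorem buildRunsB_eq (xs : List Char) (hxs : xs ≠ []) :
    buildRunsB xs = intify (runsL xs) := by
  cases xs with
  | nil => exact absurd rfl hxs
  | cons c t =>
    show (let st := (c :: t).foldl stepB (none, 0, []); _) = _
    rw [List.foldl_cons]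
    rw [show stepB (none, 0, []) c = (some c, ((1 : Nat) : Int), []) by simp [stepB]]
    exact foldB_inv t c 1 [] le_rfl

theorem foldl_sq (l : List (Char × Nat)) :
    ∀ acc : Int, (intify l).foldl (fun acc p => acc + p.2 * p.2) acc = acc + sqR l := by
  induction l with
  | nil => intro acc; simp [intify, sqR]
  | cons p l ih =>
    intro acc
    simp only [intify, List.map_cons, List.foldl_cons]
    rw [show intify l = List.map (fun p => (p.1, (p.2 : Int))) l from rfl] at ih
    rw [ih]
    simp [sqR]
    ring

theorem intify_getD (rs : List (Char × Nat)) (r : Nat) :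
    (intify rs).getD r (' ', 0) = ((rs.getD r (' ', 0)).1, ((rs.getD r (' ', 0)).2 : Int)) := by
  rcases Nat.lt_or_ge r rs.length with h | h
  · rw [List.getD_eq_getElem _ _ (by simpa [intify] using h), List.getD_eq_getElem _ _ h]
    simp [intify]
  · rw [List.getD_eq_default _ _ (by simpa [intify] using h), List.getD_eq_default _ _ h]
    simp

theorem flatMap_congr_mem {α β : Type} (l : List α) (f g : α → List β)
    (h : ∀ a ∈ l, f a = g a) : l.flatMap f = l.flatMap g := by
  induction l with
  | nil => simp
  | cons a l ih =>
    simp only [List.flatMap_cons]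
    rw [h a (by simp), ih (fun a ha => h a (by simp [ha]))]

def pycandP (runs : List (Char × Int)) (base : Int) (r : Nat) (j : Int) : Int :=
  let c := (runs.getD r (' ', 0)).1
  let L := (runs.getD r (' ', 0)).2
  let target := if c == '0' then '1' else '0'
  let prevMerge := decide (r > 0) && ((runs.getD (r - 1) (' ', 0)).1 == target)
  let nextMerge := decide (r + 1 < runs.length) && ((runs.getD (r + 1) (' ', 0)).1 == target)
  let left := j
  let right := L - 1 - j
  let removed1 := L * L
  let mid1 : Int := 1
  let removed2 := if left == 0 && prevMerge then removed1 + (runs.getD (r - 1) (' ', 0)).2 ^ 2 else removed1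
  let mid2 := if left == 0 && prevMerge then mid1 + (runs.getD (r - 1) (' ', 0)).2 else mid1
  let removed3 := if right == 0 && nextMerge then removed2 + (runs.getD (r + 1) (' ', 0)).2 ^ 2 else removed2
  let mid3 := if right == 0 && nextMerge then mid2 + (runs.getD (r + 1) (' ', 0)).2 else mid2
  base - removed3 + left * left + right * right + mid3 * mid3

theorem pchar_some (x : Char × Nat) (t : Char) : pchar (some x) t = (x.1 == t) := rfl

theorem pchar_none (t : Char) : pchar none t = false := rfl
theorem pcnt_some (x : Char × Nat) : pcnt (some x) = (x.2 : Int) := rfl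
theorem pcnt_none : pcnt none = 0 := rfl

set_option maxRecDepth 8192 in
theorem pycand_eq (rs : List (Char × Nat)) (S : Int) (r : Nat) (hr : r < rs.length) (k : Nat)
    (hk : k < (rs.getD r (' ', 0)).2) :
    pycandP (intify rs) S r (k : Int)
      = candB S (if r = 0 then none else some (rs.getD (r - 1) (' ', 0)))
          (rs.getD r (' ', 0)).1 (rs.getD r (' ', 0)).2 rs[r + 1]? k := by
  have hlen : (intify rs).length = rs.length := by simp [intify]
  have htar : ∀ c : Char, (if c == '0' then '1' else '0') = flipc c := fun _ => rfl
  have hk0 : ((k : Int) == 0) = decide (k = 0) := by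
    rw [Bool.eq_iff_iff]
    simp only [beq_iff_eq, decide_eq_true_iff]
    omega
  have hkL : ((((rs.getD r (' ', 0)).2 - 1 - k : Nat) : Int) == 0)
      = decide (k = (rs.getD r (' ', 0)).2 - 1) := by
    rw [Bool.eq_iff_iff]
    simp only [beq_iff_eq, decide_eq_true_iff]
    omega
  have hrt : (((rs.getD r (' ', 0)).2 : Int)) - 1 - (k : Int)
      = (((rs.getD r (' ', 0)).2 - 1 - k : Nat) : Int) := by omega
  by_cases hr0 : r = 0 <;> rcases Nat.lt_or_ge (r + 1) rs.length with hr1 | hr1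
  · have hgt : decide (r > 0) = false := by simp [hr0]
    have hn : rs[r + 1]? = some (rs.getD (r + 1) (' ', 0)) := by
      rw [List.getElem?_eq_getElem hr1, List.getD_eq_getElem _ _ hr1]
    simp only [pycandP, candB, intify_getD, hlen, htar, hk0, hkL, hrt, if_pos hr0, hgt, hn,
      pchar_some, pchar_none, pcnt_some, pcnt_none, Bool.false_and, Bool.and_false,
      Bool.true_and, Bool.and_true, if_false,
      show decide (r + 1 < rs.length) = true from by simp [hr1]]
    split_ifs
    all_goals try (push_cast; ring)
    all_goals first
      | exact absurd ‹false = true› Bool.false_ne_true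
      | exact ‹False›.elim
  · have hgt : decide (r > 0) = false := by simp [hr0]
    have hn : rs[r + 1]? = none := List.getElem?_eq_none hr1
    simp only [pycandP, candB, intify_getD, hlen, htar, hk0, hkL, hrt, if_pos hr0, hgt, hn,
      pchar_some, pchar_none, pcnt_some, pcnt_none, Bool.false_and, Bool.and_false,
      Bool.true_and, Bool.and_true, if_false,
      show decide (r + 1 < rs.length) = false from by simp; omega]
    split_ifs
    all_goals try (push_cast; ring)
    all_goals first
      | exact absurd ‹false = true› Bool.false_ne_true
      | exact ‹False›.elim
  · have hgt : decide (r > 0) = true := by simp [Nat.pos_of_ne_zero hr0]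
    have hn : rs[r + 1]? = some (rs.getD (r + 1) (' ', 0)) := by
      rw [List.getElem?_eq_getElem hr1, List.getD_eq_getElem _ _ hr1]
    simp only [pycandP, candB, intify_getD, hlen, htar, hk0, hkL, hrt, if_neg hr0, hgt, hn,
      pchar_some, pchar_none, pcnt_some, pcnt_none, Bool.false_and, Bool.and_false,
      Bool.true_and, Bool.and_true, if_false,
      show decide (r + 1 < rs.length) = true from by simp [hr1]]
    split_ifs
    all_goals try (push_cast; ring)
    all_goals first
      | exact absurd ‹false = true› Bool.false_ne_true
      | exact ‹False›.elim
  · have hgt : decide (r > 0) = true := by simp [Nat.pos_of_ne_zero hr0]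
    have hn : rs[r + 1]? = none := List.getElem?_eq_none hr1
    simp only [pycandP, candB, intify_getD, hlen, htar, hk0, hkL, hrt, if_neg hr0, hgt, hn,
      pchar_some, pchar_none, pcnt_some, pcnt_none, Bool.false_and, Bool.and_false,
      Bool.true_and, Bool.and_true, if_false,
      show decide (r + 1 < rs.length) = false from by simp; omega]
    split_ifs
    all_goals try (push_cast; ring)
    all_goals first
      | exact absurd ‹false = true› Bool.false_ne_true
      | exact ‹False›.elim

theorem candListB_flatMap (S : Int) (rs : List (Char × Nat)) :
    ∀ prev, candListB S prev rs = (List.range rs.length).flatMap (fun r =>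
      (List.range (rs.getD r (' ', 0)).2).map
        (candB S (if r = 0 then prev else some (rs.getD (r - 1) (' ', 0)))
          (rs.getD r (' ', 0)).1 (rs.getD r (' ', 0)).2 rs[r + 1]?)) := by
  induction rs with
  | nil => intro prev; simp [candListB]
  | cons cL t ih =>
    intro prev
    obtain ⟨c, L⟩ := cL
    rw [candListB, List.length_cons, List.range_succ_eq_map, List.flatMap_cons, List.flatMap_map]
    congr 1
    · simp [List.head?_eq_getElem?]
    · rw [ih (some (c, L))]
      apply flatMap_congr_mem
      intro r _
      cases r with
      | zero => simp
      | succ n => simp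

def altBody (runs : List (Char × Int)) : Int :=
  let base := runs.foldl (fun acc p => acc + p.2 * p.2) 0
  (List.range runs.length).foldl (fun best r =>
    let c := (runs.getD r (' ', 0)).1
    let L := (runs.getD r (' ', 0)).2
    let target := if c == '0' then '1' else '0'
    let prevMerge := decide (r > 0) && ((runs.getD (r - 1) (' ', 0)).1 == target)
    let nextMerge := decide (r + 1 < runs.length) && ((runs.getD (r + 1) (' ', 0)).1 == target)
    (PySem.List.pyRange 0 L 1).foldl (fun best j =>
      let left := j
      let right := L - 1 - j
      let removed1 := L * L
      let mid1 : Int := 1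
      let removed2 := if left == 0 && prevMerge then removed1 + (runs.getD (r - 1) (' ', 0)).2 ^ 2 else removed1
      let mid2 := if left == 0 && prevMerge then mid1 + (runs.getD (r - 1) (' ', 0)).2 else mid1
      let removed3 := if right == 0 && nextMerge then removed2 + (runs.getD (r + 1) (' ', 0)).2 ^ 2 else removed2
      let mid3 := if right == 0 && nextMerge then mid2 + (runs.getD (r + 1) (' ', 0)).2 else mid2
      let cand := base - removed3 + left * left + right * right + mid3 * mid3
      if cand > best then cand else best) best) base

theorem alt_eq_altBody (s : String) : findMaxStrength_alt s = altBody (buildRunsB s.toList) := rfl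

theorem B_list (xs : List Char) (hxs : xs ≠ []) :
    altBody (buildRunsB xs)
      = List.foldl opMax (sqR (runsL xs)) (candListB (sqR (runsL xs)) none (runsL xs)) := by
  obtain ⟨hc, hch, hF, hne⟩ := runsL_canon xs hxs
  rw [buildRunsB_eq xs hxs]
  have hbase : (intify (runsL xs)).foldl (fun acc p => acc + p.2 * p.2) 0 = sqR (runsL xs) := by
    rw [foldl_sq]; ring
  have hlen : (intify (runsL xs)).length = (runsL xs).length := by simp [intify]
  rw [show altBody (intify (runsL xs))
      = (List.range (intify (runsL xs)).length).foldl (fun best r =>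
          ((PySem.List.pyRange 0 ((intify (runsL xs)).getD r (' ', 0)).2 1).map
            (pycandP (intify (runsL xs)) (sqR (runsL xs)) r)).foldl opMax best)
        (sqR (runsL xs)) from by
    rw [altBody]
    simp only [hbase]
    congr 1
    funext best r
    rw [List.foldl_map]
    rfl]
  rw [foldl_opMax_flatMap, hlen]
  congr 1
  rw [candListB_flatMap (sqR (runsL xs)) (runsL xs) none]
  apply flatMap_congr_mem
  intro r hr
  have hr' : r < (runsL xs).length := List.mem_range.1 hr
  rw [intify_getD, PySem.List.pyRange_zero_natCast, List.map_map]
  apply List.map_congr_left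
  intro k hk
  exact pycand_eq (runsL xs) (sqR (runsL xs)) r hr' k (List.mem_range.1 hk)

-- ===== VERDICT (by name: the statement is the Claim_ definition above) =====
theorem findMaxStrength_spec : Claim_equal_findMaxStrength := by
  intro s _ hpre
  show findMaxStrength s = findMaxStrength_alt s
  have hs : s.toList ≠ [] := fun h => hpre (String.toList_eq_nil_iff.1 h)
  have hA : findMaxStrength s
      = List.foldl opMax (sqR (runsL s.toList))
          (candListB (sqR (runsL s.toList)) none (runsL s.toList)) := A_list s.toList hs
  rw [alt_eq_altBody, B_list s.toList hs]
  exact hA
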